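-- pv_equiv track=rewrite | github.com/BluePhoenix01/Coding-Bat | Recursion 2/groupSum5.py | groupSum5
-- ===== SOURCE A (Python) =====
-- def groupSum5(start, nums, target):
--     if start >= len(nums):
--         return target == 0
--     if nums[start]%5 == 0:
--         if start+1 < len(nums) and nums[start+1] != 1:
--             return groupSum5(start+1, nums, target - nums[start])
--         return groupSum5(start+2, nums, target - nums[start])
--     if groupSum5(start+1, nums, target - nums[start]):
--         return True
--     if groupSum5(start+1, nums, target):
--         return True
--     return False
-- ===== SOURCE B (Python) =====
-- def groupSum5(start, nums, target):
--     # Forward DP over the suffix: maintain the set of achievable chosen-sums.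
--     n = len(nums)
--     sums = {0}
--     i = start
--     while i < n:
--         v = nums[i]
--         if v % 5 == 0:
--             # multiples of 5 are always included; a 1 immediately after is skipped
--             sums = {s + v for s in sums}
--             i += 2 if (i + 1 < n and nums[i + 1] == 1) else 1
--         else:
--             sums |= {s + v for s in sums}
--             i += 1
--     return target in sums
-- ===== Notes on version B (the rewrite author's own statement) =====
-- stated objective: alternative
-- what changed: Replaces the exponential include/exclude recursion by a single forward pass that maintains the set of achievable chosen-sums (iterative subset-sum DP) and checks membership of target at the end; pseudo-polynomial when element values are bounded, but not measurably faster on random 32-bit values (A's early exit can win), so no speed is claimed.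
import Mathlib
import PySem

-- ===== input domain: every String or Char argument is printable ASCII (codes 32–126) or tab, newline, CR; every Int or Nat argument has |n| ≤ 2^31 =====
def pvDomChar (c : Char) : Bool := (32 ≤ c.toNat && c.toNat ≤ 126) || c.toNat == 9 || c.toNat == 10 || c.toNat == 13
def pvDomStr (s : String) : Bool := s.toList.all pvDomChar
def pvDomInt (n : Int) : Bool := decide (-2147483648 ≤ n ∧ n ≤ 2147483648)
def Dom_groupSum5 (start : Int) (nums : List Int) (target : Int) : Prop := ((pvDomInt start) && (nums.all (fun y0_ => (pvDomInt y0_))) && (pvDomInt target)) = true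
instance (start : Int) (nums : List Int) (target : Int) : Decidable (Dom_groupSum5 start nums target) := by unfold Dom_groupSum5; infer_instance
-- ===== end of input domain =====

-- B replaces A's exponential include/exclude recursion by one forward pass maintaining
-- the set of achievable chosen-sums (iterative subset-sum DP); objective: alternative
-- (no speed claim: with unbounded values the sum set can grow exponentially too).

-- ===== PORT A =====
def groupSum5 (start : Int) (nums : List Int) (target : Int) : Bool :=
  if h : (nums.length : Int) ≤ start then target == 0
  else
    match PySem.List.pyGet? nums start with
    | none => false   -- Python raises IndexError here; excluded by Pre_groupSum5
    | some v =>
      if PySem.Int.mod v 5 == 0 then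
        if start + 1 < (nums.length : Int) && (PySem.List.pyGetD nums (start + 1) 0 != 1) then
          groupSum5 (start + 1) nums (target - v)
        else
          groupSum5 (start + 2) nums (target - v)
      else
        if groupSum5 (start + 1) nums (target - v) then true
        else if groupSum5 (start + 1) nums target then true
        else false
termination_by ((nums.length : Int) - start).toNat
decreasing_by all_goals (simp at h; omega)

-- ===== PORT B =====
-- the while loop of Source B: state = (index i, set of achievable chosen-sums)
def groupSum5AltLoop (nums : List Int) (i : Int) (sums : PySem.Set Int) : PySem.Set Int :=
  if h : (nums.length : Int) ≤ i then sums
  else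
    match PySem.List.pyGet? nums i with
    | none => sums   -- Python raises IndexError here; excluded by Pre_groupSum5
    | some v =>
      if PySem.Int.mod v 5 == 0 then
        groupSum5AltLoop nums
          (if i + 1 < (nums.length : Int) && (PySem.List.pyGetD nums (i + 1) 0 == 1)
           then i + 2 else i + 1)
          (PySem.Set.ofList (sums.map (· + v)))
      else
        groupSum5AltLoop nums (i + 1) (PySem.Set.union sums (sums.map (· + v)))
termination_by ((nums.length : Int) - i).toNat
decreasing_by all_goals (simp at h; first | (split_ifs <;> omega) | omega)

def groupSum5_alt (start : Int) (nums : List Int) (target : Int) : Bool :=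
  PySem.Set.contains (groupSum5AltLoop nums start (PySem.Set.ofList [0])) target

-- ===== PRECONDITION & SPEC =====
-- Pre_ excludes exactly the inputs where Python A raises IndexError (start below -len(nums));
-- Python B raises there as well.
def Pre_groupSum5 (start : Int) (nums : List Int) (target : Int) : Prop :=
  -(nums.length : Int) ≤ start
instance (start : Int) (nums : List Int) (target : Int) : Decidable (Pre_groupSum5 start nums target) := by unfold Pre_groupSum5; infer_instance

def pvWitness_groupSum5 : Int × List Int × Int := (0, [2, 5, 1, 3], 10)

def Spec_groupSum5 (start : Int) (nums : List Int) (target : Int) (out : Bool) : Prop := out = groupSum5_alt start nums target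
instance (start : Int) (nums : List Int) (target : Int) (out : Bool) : Decidable (Spec_groupSum5 start nums target out) := by unfold Spec_groupSum5; infer_instance

-- ===== CLAIM (what is proved, stated in full; the proofs are below) =====
def Claim_equal_groupSum5 : Prop := ∀ (start : Int) (nums : List Int) (target : Int), Dom_groupSum5 start nums target → Pre_groupSum5 start nums target → Spec_groupSum5 start nums target (groupSum5 start nums target)

-- ===== LEMMAS AND PROOFS =====

-- A at an index past the end just tests the target against 0.
lemma groupSum5_of_le (nums : List Int) (i t : Int) (h : (nums.length : Int) ≤ i) :
    groupSum5 i nums t = (t == 0) := by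
  rw [groupSum5]; exact dif_pos h

-- Invariant of B's loop: t lies in the final set iff some s already in the set lets
-- A's recursion from index i succeed on target t - s.
lemma groupSum5AltLoop_mem (nums : List Int) :
    ∀ (fuel : Nat) (i : Int), ((nums.length : Int) - i).toNat ≤ fuel →
      -(nums.length : Int) ≤ i → ∀ (S : PySem.Set Int) (t : Int),
      (t ∈ groupSum5AltLoop nums i S ↔ ∃ s ∈ S, groupSum5 i nums (t - s) = true) := by
  intro fuel
  induction fuel with
  | zero =>
    intro i hf hlo S t
    have hlen : (nums.length : Int) ≤ i := by omega
    rw [groupSum5AltLoop]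
    simp only [dif_pos hlen, groupSum5_of_le nums i _ hlen, beq_iff_eq, sub_eq_zero]
    constructor
    · intro h; exact ⟨t, h, rfl⟩
    · rintro ⟨s, hs, rfl⟩; exact hs
  | succ fuel ih =>
    intro i hf hlo S t
    by_cases hlen : (nums.length : Int) ≤ i
    · rw [groupSum5AltLoop]
      simp only [dif_pos hlen, groupSum5_of_le nums i _ hlen, beq_iff_eq, sub_eq_zero]
      constructor
      · intro h; exact ⟨t, h, rfl⟩
      · rintro ⟨s, hs, rfl⟩; exact hs
    · obtain ⟨v, hv⟩ : ∃ v, PySem.List.pyGet? nums i = some v := by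
        cases hg : PySem.List.pyGet? nums i with
        | none =>
          rw [PySem.List.pyGet?_eq_none_iff] at hg
          exact absurd (by constructor <;> omega : PySem.Raise.InRange nums.length i) hg
        | some v => exact ⟨v, rfl⟩
      have hf1 : ((nums.length : Int) - (i + 1)).toNat ≤ fuel := by omega
      have hf2 : ((nums.length : Int) - (i + 2)).toNat ≤ fuel := by omega
      by_cases h5 : (PySem.Int.mod v 5 == 0) = true
      · -- forced-include branch of both programs
        by_cases hc : (i + 1 < (nums.length : Int) && (PySem.List.pyGetD nums (i + 1) 0 != 1)) = true
        · -- both step to i+1 after adding v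
          obtain ⟨h1, hne⟩ : (i + 1 < (nums.length : Int)) ∧ ¬(PySem.List.pyGetD nums (i + 1) 0 = 1) := by
            simpa using hc
          have hA : ∀ x, groupSum5 i nums x = groupSum5 (i + 1) nums (x - v) := by
            intro x
            rw [groupSum5, dif_neg hlen, hv]
            simp only [h5, hc, if_true]
          have hB : groupSum5AltLoop nums i S =
              groupSum5AltLoop nums (i + 1) (PySem.Set.ofList (S.map (· + v))) := by
            rw [groupSum5AltLoop, dif_neg hlen, hv]
            have hc2 : (decide (i + 1 < (nums.length : Int)) && PySem.List.pyGetD nums (i + 1) 0 == 1) = false := by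
              simp [hne]
            simp only [h5, hc2, if_true, Bool.false_eq_true, if_false]
          rw [hB, ih (i + 1) hf1 (by omega)]
          simp only [hA]
          simp [PySem.Set.mem_ofList, sub_add_eq_sub_sub]
        · by_cases h1 : i + 1 < (nums.length : Int)
          · -- next element is a 1: both skip it, stepping to i+2
            have hone : PySem.List.pyGetD nums (i + 1) 0 = 1 := by
              simp [h1] at hc; exact hc
            have hA : ∀ x, groupSum5 i nums x = groupSum5 (i + 2) nums (x - v) := by
              intro x
              have hc' : (decide (i + 1 < (nums.length : Int)) && PySem.List.pyGetD nums (i + 1) 0 != 1) = false := by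
                simpa using hc
              rw [groupSum5, dif_neg hlen, hv]
              simp only [h5, hc', if_true, Bool.false_eq_true, if_false]
            have hB : groupSum5AltLoop nums i S =
                groupSum5AltLoop nums (i + 2) (PySem.Set.ofList (S.map (· + v))) := by
              rw [groupSum5AltLoop, dif_neg hlen, hv]
              simp only [h5, if_true]
              congr 1
              simp [h1, hone]
            rw [hB, ih (i + 2) hf2 (by omega)]
            simp only [hA]
            simp [PySem.Set.mem_ofList, sub_add_eq_sub_sub]
          · -- i is the last index: A steps to i+2, B to i+1, both past the end
            have hA : ∀ x, groupSum5 i nums x = (x - v == 0) := by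
              intro x
              have hc' : (decide (i + 1 < (nums.length : Int)) && PySem.List.pyGetD nums (i + 1) 0 != 1) = false := by
                simpa using hc
              rw [groupSum5, dif_neg hlen, hv]
              simp only [h5, hc', if_true, Bool.false_eq_true, if_false]
              exact groupSum5_of_le nums (i + 2) (x - v) (by omega)
            have hB : groupSum5AltLoop nums i S =
                groupSum5AltLoop nums (i + 1) (PySem.Set.ofList (S.map (· + v))) := by
              rw [groupSum5AltLoop, dif_neg hlen, hv]
              simp only [h5, if_true]
              congr 1
              simp [h1]
            rw [hB, ih (i + 1) hf1 (by omega)]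
            constructor
            · rintro ⟨s', hs', hP⟩
              rw [PySem.Set.mem_ofList, List.mem_map] at hs'
              obtain ⟨a, ha, rfl⟩ := hs'
              refine ⟨a, ha, ?_⟩
              rw [hA]
              rw [groupSum5_of_le nums (i + 1) _ (by omega)] at hP
              simp only [beq_iff_eq] at hP ⊢
              omega
            · rintro ⟨a, ha, hP⟩
              refine ⟨a + v, ?_, ?_⟩
              · rw [PySem.Set.mem_ofList, List.mem_map]; exact ⟨a, ha, rfl⟩
              · rw [groupSum5_of_le nums (i + 1) _ (by omega)]
                rw [hA] at hP
                simp only [beq_iff_eq] at hP ⊢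
                omega
      · -- free choice: include v or not
        have hA : ∀ x, groupSum5 i nums x =
            (groupSum5 (i + 1) nums (x - v) || groupSum5 (i + 1) nums x) := by
          intro x
          have h5' : (PySem.Int.mod v 5 == 0) = false := by simpa using h5
          rw [groupSum5, dif_neg hlen, hv]
          simp only [h5', Bool.false_eq_true, if_false]
          cases groupSum5 (i + 1) nums (x - v) <;> cases groupSum5 (i + 1) nums x <;> simp
        have hB : groupSum5AltLoop nums i S =
            groupSum5AltLoop nums (i + 1) (PySem.Set.union S (S.map (· + v))) := by
          have h5' : (PySem.Int.mod v 5 == 0) = false := by simpa using h5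
          rw [groupSum5AltLoop, dif_neg hlen, hv]
          simp only [h5', Bool.false_eq_true, if_false]
        rw [hB, ih (i + 1) hf1 (by omega)]
        simp only [hA]
        simp only [PySem.Set.mem_union, List.mem_map, Bool.or_eq_true]
        constructor
        · rintro ⟨s, hs | ⟨s0, hs0, rfl⟩, hP⟩
          · exact ⟨s, hs, Or.inr hP⟩
          · exact ⟨s0, hs0, Or.inl (by rwa [sub_add_eq_sub_sub] at hP)⟩
        · rintro ⟨s, hs, hP | hP⟩
          · exact ⟨s + v, Or.inr ⟨s, hs, rfl⟩, by rwa [sub_add_eq_sub_sub]⟩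
          · exact ⟨s, Or.inl hs, hP⟩

-- ===== VERDICT (by name: the statement is the Claim_ definition above) =====
theorem groupSum5_spec : Claim_equal_groupSum5 := by
  intro start nums target _hdom hpre
  unfold Spec_groupSum5 groupSum5_alt
  rw [Bool.eq_iff_iff, PySem.Set.contains_iff,
    groupSum5AltLoop_mem nums (((nums.length : Int) - start).toNat) start le_rfl hpre]
  simp
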